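-- pv_equiv track=rewrite | github.com/duersjefen/filter-ical | backend/app/middleware/schema_validation.py | _match_path_pattern
-- ===== SOURCE A (Python) =====
-- def _match_path_pattern(actual_path: str, pattern_path: str) -> bool:
--     """
--     Match actual path against OpenAPI path pattern with parameters.
--     E.g., "/api/calendar/cal_123/events" matches "/api/calendar/{calendar_id}/events"
--     """
--     actual_parts = actual_path.split('/')
--     pattern_parts = pattern_path.split('/')
--
--     if len(actual_parts) != len(pattern_parts):
--         return False
--
--     for actual, pattern in zip(actual_parts, pattern_parts):
--         if pattern.startswith('{') and pattern.endswith('}'):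
--             # This is a path parameter, any value matches
--             continue
--         elif actual != pattern:
--             # Literal path segment must match exactly
--             return False
--
--     return True
-- ===== SOURCE B (Python) =====
-- def _match_path_pattern(actual_path: str, pattern_path: str) -> bool:
--     """Recursive pairwise matcher: no length pre-check, no zip; recursion
--     over both segment lists rejects length mismatches structurally."""
--     def go(a, p):
--         if not a or not p:
--             return not a and not p
--         pat = p[0]
--         ok = (pat.startswith('{') and pat.endswith('}')) or a[0] == pat
--         return ok and go(a[1:], p[1:])
--     return go(actual_path.split('/'), pattern_path.split('/'))
-- ===== Notes on version B (the rewrite author's own statement) =====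
-- stated objective: simpler
-- what changed: Replaces A's explicit length check plus zip loop with a single structural recursion over both segment lists, in which a length mismatch falls out of the base cases instead of being tested up front.
import Mathlib
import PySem

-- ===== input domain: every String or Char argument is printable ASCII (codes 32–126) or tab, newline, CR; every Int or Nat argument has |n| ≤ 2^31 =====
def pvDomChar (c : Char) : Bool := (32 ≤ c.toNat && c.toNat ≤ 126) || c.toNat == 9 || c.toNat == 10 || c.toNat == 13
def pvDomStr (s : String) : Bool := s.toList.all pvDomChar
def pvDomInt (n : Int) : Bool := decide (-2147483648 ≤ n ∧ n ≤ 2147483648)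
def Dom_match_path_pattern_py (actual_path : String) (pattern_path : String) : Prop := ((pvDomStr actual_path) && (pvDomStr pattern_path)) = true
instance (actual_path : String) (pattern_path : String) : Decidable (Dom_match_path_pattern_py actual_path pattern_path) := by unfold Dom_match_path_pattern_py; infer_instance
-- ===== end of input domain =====

-- B replaces A's length check + zip loop by one structural recursion over both segment lists (objective: simpler).


-- ===== PORT A =====
-- s.split("/"): sep "/" is nonempty, so PySem.Str.split? is always `some`; .getD [] only discharges the option
-- the for-loop over zip(actual_parts, pattern_parts) with its early `return False`
def pvLoopA : List (String × String) → Bool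
  | [] => true
  | (actual, pattern) :: rest =>
      if PySem.Str.startswith pattern "{" && PySem.Str.endswith pattern "}" then
        pvLoopA rest
      else if actual ≠ pattern then
        false
      else
        pvLoopA rest

def match_path_pattern_py (actual_path : String) (pattern_path : String) : Bool :=
  let actual_parts := (PySem.Str.split? actual_path "/").getD []
  let pattern_parts := (PySem.Str.split? pattern_path "/").getD []
  if actual_parts.length ≠ pattern_parts.length then false
  else pvLoopA (actual_parts.zip pattern_parts)

-- ===== PORT B =====
-- Source B's inner `go`: simultaneous recursion over both lists
def pvGo : List String → List String → Bool
  | [], [] => true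
  | [], _ :: _ => false
  | _ :: _, [] => false
  | a :: as, p :: ps =>
      ((PySem.Str.startswith p "{" && PySem.Str.endswith p "}") || a == p) && pvGo as ps

def match_path_pattern_py_alt (actual_path : String) (pattern_path : String) : Bool :=
  pvGo ((PySem.Str.split? actual_path "/").getD []) ((PySem.Str.split? pattern_path "/").getD [])

-- ===== PRECONDITION & SPEC =====
def Spec_match_path_pattern_py (actual_path : String) (pattern_path : String) (out : Bool) : Prop := out = match_path_pattern_py_alt actual_path pattern_path
instance (actual_path : String) (pattern_path : String) (out : Bool) : Decidable (Spec_match_path_pattern_py actual_path pattern_path out) := by unfold Spec_match_path_pattern_py; infer_instance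

-- ===== CLAIM (what is proved, stated in full; the proofs are below) =====
def Claim_equal_match_path_pattern_py : Prop := ∀ (actual_path : String) (pattern_path : String), Dom_match_path_pattern_py actual_path pattern_path → Spec_match_path_pattern_py actual_path pattern_path (match_path_pattern_py actual_path pattern_path)

-- ===== LEMMAS AND PROOFS =====
theorem pvLoopA_eq_pvGo (xs : List String) : ∀ (ys : List String),
    (if xs.length ≠ ys.length then false else pvLoopA (xs.zip ys)) = pvGo xs ys := by
  induction xs with
  | nil =>
    intro ys
    cases ys with
    | nil => simp [pvLoopA, pvGo]
    | cons y ys => simp [pvGo]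
  | cons x xs ih =>
    intro ys
    cases ys with
    | nil => simp [pvGo]
    | cons y ys =>
      have h := ih ys
      by_cases hlen : xs.length = ys.length <;>
      by_cases h1 : PySem.Chars.startswith y.toList ['{'] = true <;>
      by_cases h2 : PySem.Chars.endswith y.toList ['}'] = true <;>
      by_cases hxy : x = y <;>
      simp_all [pvLoopA, pvGo, List.zip_cons_cons]

-- ===== VERDICT (by name: the statement is the Claim_ definition above) =====
theorem match_path_pattern_py_spec : Claim_equal_match_path_pattern_py := by
  intro actual_path pattern_path _
  unfold Spec_match_path_pattern_py match_path_pattern_py match_path_pattern_py_alt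
  exact pvLoopA_eq_pvGo _ _
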